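-- pv_equiv track=rewrite | github.com/JoeBlackman/commRegression | utilities.py | removeExtraColumns
-- ===== SOURCE A (Python) =====
-- def invertListOfLists(list):
--     """Inverts a list of lists, returns a list of lists"""
--     list = zip(*list)
--     list = [x for x in list]
--     return list
--
-- def removeExtraColumns(data):
--     """Remove the columns that have None as header"""
--     oldData = invertListOfLists(data) #now we have list of lists (columns)
--     newData = []
--     for column in oldData:
--         if column[0] != 'None':
--             newData.append(column)
--     newData = invertListOfLists(newData)
--     return newData
-- ===== SOURCE B (Python) =====
-- def removeExtraColumns(data):
--     """Remove the columns that have None as header"""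
--     if not data:
--         return []
--     keep = [j for j, h in enumerate(data[0]) if h != 'None']
--     if not keep:
--         return []
--     return [tuple(row[j] for j in keep) for row in data]
-- ===== Notes on version B (the rewrite author's own statement) =====
-- stated objective: simpler
-- what changed: Replaces A's transpose-filter-transpose (two zip(*...) passes over the whole table) by computing the kept column indices once from the header and projecting each row through them in a single pass.
-- outside the precondition, e.g. on removeExtraColumns([['a', 'b'], ['x']]): A returns [['a'], ['x']], B raises IndexError
import Mathlib
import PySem

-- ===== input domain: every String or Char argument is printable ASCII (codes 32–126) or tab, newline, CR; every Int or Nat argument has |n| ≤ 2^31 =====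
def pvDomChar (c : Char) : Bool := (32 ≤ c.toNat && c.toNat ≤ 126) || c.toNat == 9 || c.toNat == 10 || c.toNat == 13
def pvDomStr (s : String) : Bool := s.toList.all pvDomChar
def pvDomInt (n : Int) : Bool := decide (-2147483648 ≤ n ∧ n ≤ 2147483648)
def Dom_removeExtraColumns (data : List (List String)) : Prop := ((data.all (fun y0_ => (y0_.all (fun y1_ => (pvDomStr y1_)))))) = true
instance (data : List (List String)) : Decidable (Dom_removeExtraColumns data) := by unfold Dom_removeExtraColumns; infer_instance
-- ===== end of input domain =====

-- B replaces A's transpose→filter→transpose with a header-index pass (keep = non-'None' column indices)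
-- and one row-wise projection: simpler/idiomatic, no transpose.  Return-value equivalence only.

-- ===== PORT A =====
-- zip(*ls): stop as soon as any list is exhausted; fuel = length of the first list (≥ the min, exact)
def pvZipGo : Nat → List (List String) → List (List String)
  | 0, _ => []
  | n + 1, ls =>
    if ls.all (fun l => !l.isEmpty) then
      ls.map (fun l => l.headD "") :: pvZipGo n (ls.map List.tail)
    else []

def invertListOfLists (list : List (List String)) : List (List String) :=
  match list with
  | [] => []
  | l0 :: rest => pvZipGo l0.length (l0 :: rest)

def removeExtraColumns (data : List (List String)) : List (List String) :=
  let oldData := invertListOfLists data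
  let newData := oldData.foldl
    (fun acc column => if column.headD "" ≠ "None" then acc ++ [column] else acc) []
  invertListOfLists newData

-- ===== PORT B =====
def removeExtraColumns_alt (data : List (List String)) : List (List String) :=
  if data.isEmpty then []
  else
    let keep := (PySem.List.enumerate (data.headD [])).filterMap
      (fun p => if p.2 ≠ "None" then some p.1 else none)
    if keep = [] then []
    else data.map (fun row => keep.map (fun j => (PySem.List.pyGet? row j).getD ""))

-- ===== PRECONDITION & SPEC =====
-- Pre_ excludes tables in which some column kept by the header (entry ≠ 'None') extends past the
-- end of a shorter row: there A's zip-based transpose silently truncates every row to the shortest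
-- one — an artefact of zip — while B, indexing rows by header positions, raises IndexError.
def Pre_removeExtraColumns (data : List (List String)) : Prop :=
  ∀ j < (data.headD []).length,
    (data.headD []).getD j "" ≠ "None" → ∀ r ∈ data, j < r.length
instance (data : List (List String)) : Decidable (Pre_removeExtraColumns data) := by
  unfold Pre_removeExtraColumns; infer_instance

def pvWitness_removeExtraColumns : List (List String) := [["a", "None", "b"], ["1", "2", "3"]]

def Spec_removeExtraColumns (data : List (List String)) (out : List (List String)) : Prop := out = removeExtraColumns_alt data
instance (data : List (List String)) (out : List (List String)) : Decidable (Spec_removeExtraColumns data out) := by unfold Spec_removeExtraColumns; infer_instance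

-- ===== CLAIM (what is proved, stated in full; the proofs are below) =====
def Claim_equal_removeExtraColumns : Prop := ∀ (data : List (List String)), Dom_removeExtraColumns data → Pre_removeExtraColumns data → Spec_removeExtraColumns data (removeExtraColumns data)

-- ===== LEMMAS AND PROOFS =====

theorem pv_getD_succ (l : List String) (i : Nat) :
    l.getD (i + 1) "" = l.tail.getD i "" := by
  cases l <;> simp

theorem pv_headD_getD (l : List String) : l.headD "" = l.getD 0 "" := by
  cases l <;> simp

def pvMinLen : List (List String) → Nat
  | [] => 0
  | [l] => l.length
  | l :: r :: t => min l.length (pvMinLen (r :: t))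

theorem pvMinLen_le (ls : List (List String)) (l : List String) (h : l ∈ ls) :
    pvMinLen ls ≤ l.length := by
  induction ls with
  | nil => cases h
  | cons x t ih =>
    cases t with
    | nil => simp at h; simp [pvMinLen, h]
    | cons y u =>
      rcases List.mem_cons.mp h with rfl | hm
      · exact min_le_left _ _
      · exact le_trans (min_le_right _ _) (ih hm)

theorem pvMinLen_mem (ls : List (List String)) (hne : ls ≠ []) :
    ∃ l ∈ ls, l.length = pvMinLen ls := by
  induction ls with
  | nil => exact absurd rfl hne
  | cons x t ih =>
    cases t with
    | nil => exact ⟨x, by simp, by simp [pvMinLen]⟩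
    | cons y u =>
      rcases le_total x.length (pvMinLen (y :: u)) with hle | hle
      · exact ⟨x, by simp, by simp [pvMinLen, min_eq_left hle]⟩
      · obtain ⟨l, hl, he⟩ := ih (by simp)
        exact ⟨l, List.mem_cons_of_mem _ hl, by simp [pvMinLen, min_eq_right hle, he]⟩

-- characterisation of zip(*ls): it stops at the minimum length L
theorem pvZipGo_char (L : Nat) (f : Nat) (ls : List (List String))
    (hle : ∀ l ∈ ls, L ≤ l.length) (hex : ∃ l ∈ ls, l.length = L) (hf : L ≤ f) :
    pvZipGo f ls = (List.range L).map (fun i => ls.map (fun l => l.getD i "")) := by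
  induction L generalizing ls f with
  | zero =>
    obtain ⟨l, hl, he⟩ := hex
    cases f with
    | zero => simp [pvZipGo]
    | succ f =>
      rw [pvZipGo, if_neg]
      · simp
      · intro hall
        simp only [List.all_eq_true] at hall
        have := hall l hl
        cases l with
        | nil => simp at this
        | cons a t => simp at he
  | succ L ih =>
    cases f with
    | zero => omega
    | succ f =>
      have hall : ls.all (fun l => !l.isEmpty) = true := by
        simp only [List.all_eq_true]
        intro l hl
        have hlen := hle l hl
        cases l with
        | nil => simp at hlen
        | cons a t => simp
      have hle' : ∀ l ∈ ls.map List.tail, L ≤ l.length := by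
        intro l hl
        simp only [List.mem_map] at hl
        obtain ⟨l', hl', rfl⟩ := hl
        have hlen := hle l' hl'
        cases l' with
        | nil => simp at hlen
        | cons a t => simp at hlen ⊢; omega
      have hex' : ∃ l ∈ ls.map List.tail, l.length = L := by
        obtain ⟨l, hl, he⟩ := hex
        refine ⟨l.tail, List.mem_map_of_mem hl, ?_⟩
        cases l with
        | nil => simp at he
        | cons a t => simp at he ⊢; omega
      rw [pvZipGo, if_pos hall, ih f (ls.map List.tail) hle' hex' (by omega),
        List.range_succ_eq_map]
      simp only [List.map_cons, List.map_map]
      congr 1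
      · exact List.map_congr_left (fun l _ => pv_headD_getD l)
      · apply List.map_congr_left
        intro i _
        simp only [Function.comp]
        exact List.map_congr_left (fun l _ => (pv_getD_succ l i).symm)

theorem pv_foldl_filter (l : List (List String)) (acc : List (List String)) :
    l.foldl (fun acc column => if column.headD "" ≠ "None" then acc ++ [column] else acc) acc
      = acc ++ l.filter (fun column => column.headD "" != "None") := by
  induction l generalizing acc with
  | nil => simp
  | cons c t ih =>
    by_cases hc : c.headD "" = "None"
    · rw [List.foldl_cons, if_neg (by simpa using hc), List.filter_cons, if_neg (by simpa using hc), ih]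
    · rw [List.foldl_cons, if_pos (by simpa using hc), List.filter_cons, if_pos (by simpa using hc), ih,
        List.append_assoc, List.singleton_append]

theorem pv_enum_filterMap (hdr : List String) (s : Int) :
    (PySem.List.enumerate hdr s).filterMap (fun p => if p.2 ≠ "None" then some p.1 else none)
      = ((List.range hdr.length).filter (fun j => hdr.getD j "" != "None")).map (fun j : Nat => s + (j : Int)) := by
  induction hdr generalizing s with
  | nil => simp [PySem.List.enumerate_nil]
  | cons h t ih =>
    have hfil : List.filter ((fun j => ((h :: t).getD j "" != "None")) ∘ Nat.succ) (List.range t.length)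
        = List.filter (fun j => t.getD j "" != "None") (List.range t.length) := by
      apply List.filter_congr
      intro j _
      have := pv_getD_succ (h :: t) j
      simp only [Function.comp_apply, List.tail_cons] at this ⊢
      rw [this]
    rw [PySem.List.enumerate_cons, List.filterMap_cons, List.length_cons,
      List.range_succ_eq_map, List.filter_cons]
    by_cases hh : h = "None"
    · rw [if_neg (by simp [hh]), ih, if_neg (by simp [hh]),
        List.filter_map, hfil, List.map_map]
      apply List.map_congr_left
      intro j _
      simp only [Function.comp_apply]
      push_cast
      ring
    · rw [if_pos (by simp [hh])]
      simp only [ih, List.filter_map, hfil]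
      rw [if_pos (by simp [hh] : ((h :: t).getD 0 "" != "None") = true), List.map_cons,
        List.map_map]
      congr 1
      · simp
      · apply List.map_congr_left
        intro j _
        simp only [Function.comp_apply]
        push_cast
        ring

theorem pv_map_range_getD {β : Type} (l : List (List String)) (g : List String → β) :
    (List.range l.length).map (fun i => g (l.getD i [])) = l.map g := by
  induction l with
  | nil => simp
  | cons x t ih =>
    simp only [List.length_cons, List.range_succ_eq_map, List.map_cons, List.map_map,
      List.getD_cons_zero]
    refine congrArg₂ List.cons rfl ?_
    rw [← ih]
    apply List.map_congr_left
    intro i _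
    simp

theorem pv_invert_char (ls : List (List String)) (L : Nat)
    (hle : ∀ l ∈ ls, L ≤ l.length) (hex : ∃ l ∈ ls, l.length = L) (hne : ls ≠ []) :
    invertListOfLists ls = (List.range L).map (fun i => ls.map (fun l => l.getD i "")) := by
  cases ls with
  | nil => exact absurd rfl hne
  | cons l0 t =>
    show pvZipGo l0.length (l0 :: t) = _
    exact pvZipGo_char L l0.length _ hle hex (hle l0 List.mem_cons_self)

theorem removeExtraColumns_spec : Claim_equal_removeExtraColumns := by
  intro data _ hpre
  unfold Spec_removeExtraColumns
  cases hdata : data with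
  | nil => simp [removeExtraColumns, removeExtraColumns_alt, invertListOfLists]
  | cons hdr rest =>
    subst hdata
    unfold Pre_removeExtraColumns at hpre
    simp only [List.headD_cons] at hpre
    set m := hdr.length with hm
    set L := pvMinLen (hdr :: rest) with hL
    have hLle : ∀ l ∈ hdr :: rest, L ≤ l.length := fun l hl => pvMinLen_le _ l hl
    have hLex : ∃ l ∈ hdr :: rest, l.length = L := pvMinLen_mem _ (by simp)
    have hLm : L ≤ m := hLle hdr List.mem_cons_self
    have hinv1 : invertListOfLists (hdr :: rest)
        = (List.range L).map (fun j => (hdr :: rest).map (fun l => l.getD j "")) :=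
      pv_invert_char _ L hLle hLex (by simp)
    set KA := (List.range L).filter (fun j => hdr.getD j "" != "None") with hKA
    set K := (List.range m).filter (fun j => hdr.getD j "" != "None") with hK
    have hKeq : KA = K := by
      rw [hKA, hK, show m = L + (m - L) by omega, List.range_add, List.filter_append]
      have hnil : ((List.range (m - L)).map (L + ·)).filter
          (fun j => hdr.getD j "" != "None") = [] := by
        rw [List.filter_eq_nil_iff]
        intro j hj
        simp only [List.mem_map, List.mem_range] at hj
        obtain ⟨k, hk, rfl⟩ := hj
        intro hp
        simp only [bne_iff_ne, ne_eq] at hp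
        obtain ⟨l, hl, he⟩ := hLex
        have := hpre (L + k) (by omega) hp l hl
        omega
      rw [hnil, List.append_nil]
    have hnew : (invertListOfLists (hdr :: rest)).foldl
        (fun acc column => if column.headD "" ≠ "None" then acc ++ [column] else acc) []
        = K.map (fun j => (hdr :: rest).map (fun l => l.getD j "")) := by
      rw [hinv1, pv_foldl_filter, List.nil_append, List.filter_map, ← hKeq, hKA]
      rfl
    have hkeep : (PySem.List.enumerate hdr).filterMap
        (fun p => if p.2 ≠ "None" then some p.1 else none)
        = K.map (fun j : Nat => (j : Int)) := by
      rw [pv_enum_filterMap hdr 0, hK]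
      simp [hm]
    unfold removeExtraColumns removeExtraColumns_alt
    simp only [List.isEmpty_cons, Bool.false_eq_true, if_false, List.headD_cons, hnew, hkeep]
    by_cases hKe : K = []
    · simp [hKe, invertListOfLists]
    · have hKmap : K.map (fun j : Nat => (j : Int)) ≠ [] := by simp [hKe]
      rw [if_neg hKmap]
      set N := (hdr :: rest).length with hN
      have hcols : ∀ c ∈ K.map (fun j => (hdr :: rest).map (fun l => l.getD j "")), N ≤ c.length := by
        intro c hc
        simp only [List.mem_map] at hc
        obtain ⟨j, _, rfl⟩ := hc
        simp [hN]
      have hcex : ∃ c ∈ K.map (fun j => (hdr :: rest).map (fun l => l.getD j "")), c.length = N := by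
        obtain ⟨j0, K', hK'⟩ := List.exists_cons_of_ne_nil hKe
        refine ⟨(hdr :: rest).map (fun l => l.getD j0 ""), ?_, by simp [hN]⟩
        exact List.mem_map_of_mem (hK' ▸ List.mem_cons_self)
      have hinv2 := pv_invert_char _ N hcols hcex (by simp [hKe])
      rw [hinv2]
      rw [← pv_map_range_getD (hdr :: rest)
        (fun row => (K.map (fun j : Nat => (j : Int))).map (fun j => (PySem.List.pyGet? row j).getD ""))]
      rw [← hN]
      apply List.map_congr_left
      intro i hi
      simp only [List.mem_range] at hi
      simp only [List.map_map]
      apply List.map_congr_left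
      intro j hj
      simp only [Function.comp_apply]
      have h1 : ((hdr :: rest).map (fun l => l.getD j "")).getD i ""
          = ((hdr :: rest).getD i []).getD j "" := by
        simp only [List.getD_eq_getElem?_getD, List.getElem?_map]
        rw [List.getElem?_eq_getElem (by simpa [hN] using hi)]
        simp
      rw [PySem.List.pyGet?_natCast, h1, List.getD_eq_getElem?_getD]
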